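-- pv_equiv track=rewrite | github.com/aguila97/Problem-Solving-Python | First-Letter-Shift/solutions.py | shift_sentence
-- ===== SOURCE A (Python) =====
-- def shift_sentence(txt):
--     if len(txt) == 1:
--         return txt
--     sentence_split = txt.split(" ")
--     length = len(sentence_split)-1
--     new_sentence = sentence_split[length][:1] + sentence_split[0][1:]
--
--     for i in range(length):
--         first_letter = sentence_split[i][:1]
--         new_word = first_letter + sentence_split[i+1][1:]
--         new_sentence += " "
--         new_sentence += new_word
--
--
--
--
--
--     return new_sentence
-- ===== SOURCE B (Python) =====
-- def shift_sentence(txt):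
--     words = txt.split(" ")
--
--     def go(ws, carry):
--         head = carry + ws[0][1:]
--         if len(ws) == 1:
--             return head
--         return head + " " + go(ws[1:], ws[0][:1])
--
--     return go(words, words[-1][:1])
-- ===== Notes on version B (the rewrite author's own statement) =====
-- stated objective: alternative
-- what changed: Replaces A's guard plus indexed loop over the split list (seed word from positions [length] and [0], then range(length) with i/i+1 indexing) with a single structural recursion over the word list that threads the previous word's first letter as a carry accumulator, seeded with the last word's first letter; A's len(txt)==1 guard is dropped since the recursion reproduces it.
import Mathlib
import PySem

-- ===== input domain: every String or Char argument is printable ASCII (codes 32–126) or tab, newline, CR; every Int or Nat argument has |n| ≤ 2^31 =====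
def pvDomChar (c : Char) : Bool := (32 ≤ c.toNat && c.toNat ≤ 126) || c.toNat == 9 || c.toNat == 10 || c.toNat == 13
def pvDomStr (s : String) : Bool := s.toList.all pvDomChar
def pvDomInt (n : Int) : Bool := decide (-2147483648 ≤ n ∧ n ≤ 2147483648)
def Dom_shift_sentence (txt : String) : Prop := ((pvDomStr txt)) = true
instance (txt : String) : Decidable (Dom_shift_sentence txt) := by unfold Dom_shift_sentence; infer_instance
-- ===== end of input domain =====

-- B drops A's len(txt)==1 guard (the general path provably reproduces it) and replaces A's indexed loop over
-- the split list with one structural recursion that threads the previous word's first letter as a carry,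
-- seeded with the last word's first letter (objective: alternative decomposition, same cost).

-- ===== PORT A =====
-- Python list indexing sentence_split[j] raises on out-of-range, but every index A uses (length, 0, i, i+1 with
-- 0 ≤ i < length = len-1, and split(" ") never returning an empty list) is in range, so pyGetD with an
-- unreachable default is exact here.
def shift_sentence (txt : String) : String :=
  if PySem.Str.len txt == 1 then txt
  else
    let sentence_split := PySem.Chars.splitOn txt.toList [' ']
    let length : Int := (sentence_split.length : Int) - 1
    let new_sentence :=
      PySem.List.slice (PySem.List.pyGetD sentence_split length []) none (some 1)
        ++ PySem.List.slice (PySem.List.pyGetD sentence_split 0 []) (some 1) none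
    let out := (PySem.List.pyRange 0 length 1).foldl
      (fun acc i =>
        let first_letter := PySem.List.slice (PySem.List.pyGetD sentence_split i []) none (some 1)
        let new_word := first_letter ++ PySem.List.slice (PySem.List.pyGetD sentence_split (i + 1) []) (some 1) none
        acc ++ [' '] ++ new_word) new_sentence
    String.ofList out

-- ===== PORT B =====
-- go is only ever called with a nonempty word list (split(" ") never returns []), so Python's ws[0] never
-- raises; the [] case below is unreachable and returns [].
def shiftGo : List (List Char) → List Char → List Char
  | [], _carry => []
  | w :: rest, carry =>
    let head := carry ++ PySem.List.slice w (some 1) none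
    if rest = [] then head
    else head ++ [' '] ++ shiftGo rest (PySem.List.slice w none (some 1))

-- words[-1] is in range (split(" ") never returns an empty list), so pyGetD with an unreachable default is exact.
def shift_sentence_alt (txt : String) : String :=
  let words := PySem.Chars.splitOn txt.toList [' ']
  String.ofList
    (shiftGo words (PySem.List.slice (PySem.List.pyGetD words (-1) []) none (some 1)))

-- ===== PRECONDITION & SPEC =====
def Spec_shift_sentence (txt : String) (out : String) : Prop := out = shift_sentence_alt txt
instance (txt : String) (out : String) : Decidable (Spec_shift_sentence txt out) := by unfold Spec_shift_sentence; infer_instance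

-- ===== CLAIM (what is proved, stated in full; the proofs are below) =====
def Claim_equal_shift_sentence : Prop := ∀ (txt : String), Dom_shift_sentence txt → Spec_shift_sentence txt (shift_sentence txt)

-- ===== LEMMAS AND PROOFS =====

lemma splitOn_go_ne_nil (sep : List Char) (fuel : Nat) (l cur : List Char) (acc : List (List Char)) :
    PySem.Chars.splitOn.go sep fuel l cur acc ≠ [] := by
  induction fuel generalizing l cur acc with
  | zero => simp [PySem.Chars.splitOn.go]
  | succ n ih =>
    cases l with
    | nil => simp [PySem.Chars.splitOn.go]
    | cons c rest =>
      rw [PySem.Chars.splitOn.go]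
      split
      · exact ih _ _ _
      · exact ih _ _ _

lemma splitOn_ne_nil (s sep : List Char) : PySem.Chars.splitOn s sep ≠ [] :=
  splitOn_go_ne_nil sep (s.length + 1) s [] []

-- B's recursion, characterised via a zip of consecutive words
lemma shiftGo_eq (w : List Char) (rest : List (List Char)) (carry : List Char) :
    shiftGo (w :: rest) carry =
      carry ++ w.drop 1 ++
        ((w :: rest).zip rest).flatMap (fun p => ' ' :: (p.1.take 1 ++ p.2.drop 1)) := by
  induction rest generalizing w carry with
  | nil => simp [shiftGo, PySem.List.slice_from _ (by norm_num : (0:Int) ≤ 1)]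
  | cons r rs ih =>
    rw [shiftGo]
    simp only [reduceCtorEq, if_false]
    rw [ih]
    simp [PySem.List.slice_from _ (by norm_num : (0:Int) ≤ 1),
      PySem.List.slice_to _ (by norm_num : (0:Int) ≤ 1), List.flatMap_cons, List.append_assoc]

-- A's loop shape: repeated 'acc ++ " " ++ piece' is init ++ flatMap
lemma foldl_sep (l : List Int) (g : Int → List Char) (init : List Char) :
    l.foldl (fun a i => a ++ [' '] ++ g i) init = init ++ l.flatMap (fun i => ' ' :: g i) := by
  induction l generalizing init with
  | nil => simp
  | cons x xs _ => simp [List.append_assoc, List.flatMap_def]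

-- the indexed range A iterates equals the zip of consecutive words
lemma range_map_eq_zip (w : List Char) (rest : List (List Char)) :
    (List.range rest.length).map
      (fun k => ' ' :: (((w :: rest).getD k []).take 1 ++ ((w :: rest).getD (k+1) []).drop 1))
    = ((w :: rest).zip rest).map (fun p => ' ' :: (p.1.take 1 ++ p.2.drop 1)) := by
  apply List.ext_getElem
  · simp
  · intro i h1 h2
    have hi : i < rest.length := by simpa using h1
    simp only [List.getElem_map, List.getElem_range, List.getElem_zip]
    congr 2
    · rw [List.getD_eq_getElem?_getD, List.getElem?_eq_getElem (by simp; omega)]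
      simp
    · rw [List.getD_eq_getElem?_getD, List.getElem?_eq_getElem (by simp; omega)]
      simp [List.getElem_cons_succ]

lemma pyGetD_last (w : List Char) (rest : List (List Char)) :
    PySem.List.pyGetD (w :: rest) (-1) [] = (w :: rest).getD rest.length [] := by
  simp only [PySem.List.pyGetD, PySem.List.pyGet?, PySem.List.pyIdx?, List.length_cons]
  split_ifs with h1 h2 <;>
    simp_all [List.getD_eq_getElem?_getD]

-- the else-branch of A (as char-list computation) equals B's computation
lemma general_eq_alt (w : List Char) (rest : List (List Char)) :
    (let sentence_split := w :: rest
     let length : Int := (sentence_split.length : Int) - 1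
     let new_sentence :=
       PySem.List.slice (PySem.List.pyGetD sentence_split length []) none (some 1)
         ++ PySem.List.slice (PySem.List.pyGetD sentence_split 0 []) (some 1) none
     (PySem.List.pyRange 0 length 1).foldl
       (fun acc i =>
         let first_letter := PySem.List.slice (PySem.List.pyGetD sentence_split i []) none (some 1)
         let new_word := first_letter ++ PySem.List.slice (PySem.List.pyGetD sentence_split (i + 1) []) (some 1) none
         acc ++ [' '] ++ new_word) new_sentence)
    = shiftGo (w :: rest)
        (PySem.List.slice (PySem.List.pyGetD (w :: rest) (-1) []) none (some 1)) := by
  set ws := w :: rest with hws'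
  set n := rest.length with hn
  have hlen : ((ws.length : Int) - 1) = (n : Int) := by simp [hws', hn]
  simp only [hlen]
  rw [foldl_sep, shiftGo_eq, PySem.List.pyRange_one]
  have hto : ∀ l : List Char, PySem.List.slice l none (some 1) = l.take 1 :=
    fun l => PySem.List.slice_to l (by norm_num)
  have hfrom : ∀ l : List Char, PySem.List.slice l (some 1) none = l.drop 1 :=
    fun l => PySem.List.slice_from l (by norm_num)
  have hg : ∀ (k : Nat), PySem.List.pyGetD ws ((0:Int) + ↑k) [] = ws.getD k [] := by
    intro k; rw [zero_add, PySem.List.pyGetD_natCast]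
  have hg1 : ∀ (k : Nat), PySem.List.pyGetD ws ((0:Int) + ↑k + 1) [] = ws.getD (k+1) [] := by
    intro k
    rw [show ((0:Int) + ↑k + 1) = ((k+1 : Nat) : Int) by push_cast; ring, PySem.List.pyGetD_natCast]
  have h0 : PySem.List.pyGetD ws 0 [] = w := by
    rw [show (0:Int) = ((0:Nat):Int) by norm_num, PySem.List.pyGetD_natCast]; rfl
  have hlast : PySem.List.pyGetD ws ((n:Int)) [] = PySem.List.pyGetD ws (-1) [] := by
    rw [PySem.List.pyGetD_natCast, hws', pyGetD_last, hn]
  rw [List.flatMap_map]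
  simp only [hto, hfrom, hg, hg1, h0, hlast, Int.sub_zero, Int.toNat_natCast]
  have hz : List.flatMap (fun k => ' ' :: (List.take 1 (ws.getD k []) ++ List.drop 1 (ws.getD (k+1) []))) (List.range n)
      = List.flatMap (fun p => ' ' :: (List.take 1 p.1 ++ List.drop 1 p.2)) ((w :: rest).zip rest) := by
    rw [List.flatMap_def, List.flatMap_def]
    exact congrArg List.flatten (range_map_eq_zip w rest)
  rw [hz]

lemma splitOn_single (c : Char) (h : c ≠ ' ') : PySem.Chars.splitOn [c] [' '] = [[c]] := by
  simp [PySem.Chars.splitOn, PySem.Chars.splitOn.go, Ne.symm h]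

lemma alt_single (txt : String) (c : Char) (h : txt.toList = [c]) :
    shift_sentence_alt txt = txt := by
  unfold shift_sentence_alt
  rw [h]
  by_cases hc : c = ' '
  · subst hc
    rw [show PySem.Chars.splitOn [' '] [' '] = [[], []] from rfl]
    conv_rhs => rw [← @String.ofList_toList txt, h]
    rfl
  · rw [splitOn_single c hc]
    conv_rhs => rw [← @String.ofList_toList txt, h]
    simp [shiftGo, PySem.List.pyGetD, PySem.List.pyGet?, PySem.List.pyIdx?,
      PySem.List.slice_to _ (by norm_num : (0:Int) ≤ 1),
      PySem.List.slice_from _ (by norm_num : (0:Int) ≤ 1)]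

-- ===== VERDICT (by name: the statement is the Claim_ definition above) =====
theorem shift_sentence_spec : Claim_equal_shift_sentence := by
  intro txt _
  unfold Spec_shift_sentence shift_sentence
  split
  · next hlen =>
    have h1 : txt.toList.length = 1 := by
      simp [PySem.Str.len_eq] at hlen
      exact_mod_cast hlen
    obtain ⟨c, hc⟩ := List.length_eq_one_iff.mp h1
    exact (alt_single txt c hc).symm
  · obtain ⟨w, rest, hws⟩ := List.exists_cons_of_ne_nil (splitOn_ne_nil txt.toList [' '])
    unfold shift_sentence_alt
    simp only [hws]
    exact congrArg String.ofList (general_eq_alt w rest)
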